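-- pv_equiv track=rewrite | github.com/asadalikazim/python_projects | Twitter Functions/tweets.py | user_tags
-- ===== SOURCE A (Python) =====
-- from typing import List, Dict, TextIO, Tuple
--
-- HASH_SYMBOL = '#'
--
-- TWEET_TEXT_INDEX = 0
--
-- def alnum_prefix(text: str) -> str:
--     """Return the alphanumeric prefix of text, converted to
--     lowercase. That is, return all characters in text from the
--     beginning until the first non-alphanumeric character or until the
--     end of text, if text does not contain any non-alphanumeric
--     characters.
--
--     >>> alnum_prefix('')
--     ''
--     >>> alnum_prefix('IamIamIam')
--     'iamiamiam'
--     >>> alnum_prefix('IamIamIam!!')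
--     'iamiamiam'
--     >>> alnum_prefix('IamIamIam!!andMore')
--     'iamiamiam'
--     >>> alnum_prefix('$$$money')
--     ''
--
--     """
--
--     index = 0
--     while index < len(text) and text[index].isalnum():
--         index += 1
--     return text[:index].lower()
--
-- def extract_hashtags(text: str) -> List[str]:
--     """Return a list of only the first occurences of a hashtag in the text,
--     converted to lowercase, and being case insensitive, and also in the
--     order in which they appear in the text.
--
--     >>> extract_hashtags('Hi #UofT do you like #cats #CATS #meowmeow')
--     ['uoft', 'cats', 'meowmeow']
--     >>> extract_hashtags('#cats are #cute #cats #cat meow @meow')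
--     ['cats', 'cute', 'cat']
--     >>> extract_hashtags('#many #cats$extra #meow?!')
--     ['many', 'cats', 'meow']
--     >>> extract_hashtags('No valid hashtags #! here?')
--     []
--     """
--
--     lst1 = text.split()
--     result = []
--     for word in lst1:
--         if word[0] == HASH_SYMBOL and len(word) > 1:
--             hashtag = alnum_prefix(word[1:])
--             if hashtag != '' and hashtag not in result:
--                 result.append(hashtag)
--     return result
--
-- def user_tags(d: Dict[str, List[tuple]]) -> Dict[str, List[str]]:
--     """returns a dictionary of users paired with all the unique tags they have
--     ever used.
--
--     >>>user_tags({'user1': [('#cat',1,'2',3,4), ('#dog #mouse #cat',1,'2',3,4)],\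
--     'user2': [('a',1,'2',3,4)]})
--     {'user1': ['cat', 'dog', 'mouse'], 'user2': []}
--     """
--     f = {} #dict to be returned
--     for user in d: #checks every user
--         f[user] = []
--         lst1 = []
--         for tweet in d[user]: #checks every tweet
--             lst1 = extract_hashtags(tweet[TWEET_TEXT_INDEX])
--             for tag in lst1: #collects unique tags in the new dict
--                 if tag not in f[user]:
--                     f[user].append(tag)
--     return f
-- ===== SOURCE B (Python) =====
-- from typing import List, Dict
--
-- HASH_SYMBOL = '#'
-- TWEET_TEXT_INDEX = 0
--
--
-- def _scan(text: str, tags: List[str]) -> None: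
--     """Char-level finite-state scan: append each new hashtag to tags.
--
--     States: 0 = between words, 1 = collecting a tag after a word-initial
--     '#', 2 = skipping the rest of a word."""
--     state = 0
--     buf = []
--     for c in text:
--         if state == 0:
--             if c.isspace():
--                 pass
--             elif c == HASH_SYMBOL:
--                 state, buf = 1, []
--             else:
--                 state = 2
--         elif state == 1:
--             if c.isalnum():
--                 buf.append(c.lower())
--             else:
--                 tag = ''.join(buf)
--                 if tag and tag not in tags:
--                     tags.append(tag)
--                 state = 0 if c.isspace() else 2
--         else:
--             if c.isspace():
--                 state = 0
--     if state == 1: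
--         tag = ''.join(buf)
--         if tag and tag not in tags:
--             tags.append(tag)
--
--
-- def user_tags(d: Dict[str, List[tuple]]) -> Dict[str, List[str]]:
--     f = {}
--     for user, tweets in d.items():
--         tags = []
--         for tweet in tweets:
--             _scan(tweet[TWEET_TEXT_INDEX], tags)
--         f[user] = tags
--     return f
-- ===== Notes on version B (the rewrite author's own statement) =====
-- stated objective: alternative
-- what changed: B replaces A's split-into-words / per-word alnum_prefix / per-tweet dedup-merge pipeline with a single character-level finite-state scan (states: between-words, collecting-tag, skipping-word) that emits each user's tags directly into one shared ordered dedup list across all of that user's tweets.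
import Mathlib
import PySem

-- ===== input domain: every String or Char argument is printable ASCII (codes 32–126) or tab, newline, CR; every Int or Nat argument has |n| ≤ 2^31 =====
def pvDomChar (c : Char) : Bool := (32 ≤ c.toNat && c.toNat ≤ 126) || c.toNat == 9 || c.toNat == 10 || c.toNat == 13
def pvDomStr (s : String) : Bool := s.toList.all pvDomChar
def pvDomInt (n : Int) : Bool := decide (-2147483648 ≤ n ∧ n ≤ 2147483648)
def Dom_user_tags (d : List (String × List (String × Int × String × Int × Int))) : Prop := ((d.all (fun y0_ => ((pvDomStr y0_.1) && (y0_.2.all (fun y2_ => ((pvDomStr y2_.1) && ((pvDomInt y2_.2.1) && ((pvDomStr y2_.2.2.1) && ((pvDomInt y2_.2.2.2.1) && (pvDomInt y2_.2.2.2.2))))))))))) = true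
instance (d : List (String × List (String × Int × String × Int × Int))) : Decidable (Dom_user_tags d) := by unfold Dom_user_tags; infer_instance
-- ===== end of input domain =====

-- B replaces A's split/per-word-prefix/dedup-merge pipeline by one character-level
-- finite-state scan per tweet that emits tags into a single shared ordered list per user.

-- ===== PORT A =====

-- while index < len(text) and text[index].isalnum(): index += 1
def pvAlnumIdx (cs : List Char) (i : Nat) : Nat :=
  if h : i < cs.length then
    if PySem.Chars.isalnum cs[i] then pvAlnumIdx cs (i + 1) else i
  else i
termination_by cs.length - i

-- return text[:index].lower()   (index = pvAlnumIdx …; take i = [:i] for 0 ≤ i)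
def alnum_prefix (text : String) : String :=
  String.ofList (PySem.Chars.lower (text.toList.take (pvAlnumIdx text.toList 0)))

-- for word in text.split(): …   (split() words are nonempty, so word[0] is head?)
def extract_hashtags (text : String) : List String :=
  (PySem.Chars.split₀ text.toList).foldl (fun result word =>
    if word.head? == some '#' && decide (1 < word.length) then
      let hashtag := alnum_prefix (String.ofList (word.drop 1))
      if hashtag ≠ "" ∧ hashtag ∉ result then result ++ [hashtag] else result
    else result) []

def user_tags (d : List (String × List (String × Int × String × Int × Int))) : List (String × List String) :=
  (d.foldl (fun f p =>
      (p.2).foldl (fun f tweet =>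
          (extract_hashtags tweet.1).foldl (fun f tag =>
              if tag ∈ f.getD p.1 ([] : List String) then f
              else f.insert p.1 (f.getD p.1 [] ++ [tag])) f)
        (f.insert p.1 ([] : List String)))
    PySem.Dict.empty).items

-- ===== PORT B =====

-- the FSM's state: 0 = between words, 1 = collecting a tag (with its buffer), 2 = skipping a word
inductive PvMode
  | between
  | collect : List Char → PvMode
  | skip
deriving DecidableEq, Repr

-- 'tag = ''.join(buf); if tag and tag not in tags: tags.append(tag)'
def pvEmit (buf : List Char) (tags : List String) : List String :=
  let tag := String.ofList buf
  if tag ≠ "" ∧ tag ∉ tags then tags ++ [tag] else tags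

-- the 'for c in text' loop of _scan, plus the trailing if state == 1 emit
def pvScanGo : List Char → PvMode → List String → List String
  | [], PvMode.collect buf, tags => pvEmit buf tags
  | [], _, tags => tags
  | c :: rest, PvMode.between, tags =>
    if PySem.Chars.isspace c then pvScanGo rest PvMode.between tags
    else if c = '#' then pvScanGo rest (PvMode.collect []) tags
    else pvScanGo rest PvMode.skip tags
  | c :: rest, PvMode.collect buf, tags =>
    if PySem.Chars.isalnum c then
      pvScanGo rest (PvMode.collect (buf ++ [PySem.Chars.lowerChar c])) tags
    else
      pvScanGo rest (if PySem.Chars.isspace c then PvMode.between else PvMode.skip)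
        (pvEmit buf tags)
  | c :: rest, PvMode.skip, tags =>
    if PySem.Chars.isspace c then pvScanGo rest PvMode.between tags
    else pvScanGo rest PvMode.skip tags

def user_tags_alt (d : List (String × List (String × Int × String × Int × Int))) : List (String × List String) :=
  (d.foldl (fun f p =>
      f.insert p.1 (p.2.foldl (fun tags tweet => pvScanGo tweet.1.toList PvMode.between tags) []))
    PySem.Dict.empty).items

-- ===== PRECONDITION & SPEC =====
def Spec_user_tags (d : List (String × List (String × Int × String × Int × Int))) (out : List (String × List String)) : Prop := out = user_tags_alt d
instance (d : List (String × List (String × Int × String × Int × Int))) (out : List (String × List String)) : Decidable (Spec_user_tags d out) := by unfold Spec_user_tags; infer_instance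

-- ===== CLAIM (what is proved, stated in full; the proofs are below) =====
def Claim_equal_user_tags : Prop := ∀ (d : List (String × List (String × Int × String × Int × Int))), Dom_user_tags d → Spec_user_tags d (user_tags d)

-- ===== LEMMAS AND PROOFS =====

-- the (lowercased, alphanumeric-prefix) tag a word contributes, if any
def pvTagOf? (w : List Char) : Option String :=
  if w.head? = some '#' then
    if (PySem.Chars.lower (w.drop 1)).takeWhile PySem.Chars.isalnum = [] then none
    else some (String.ofList ((PySem.Chars.lower (w.drop 1)).takeWhile PySem.Chars.isalnum))
  else none

-- the raw (pre-dedup) tag stream of a text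
def pvRaw (cs : List Char) : List String := (PySem.Chars.split₀ cs).filterMap pvTagOf?

lemma pvAlnumIdx_eq (cs : List Char) (i : Nat) :
    pvAlnumIdx cs i = i + ((cs.drop i).takeWhile PySem.Chars.isalnum).length := by
  fun_induction pvAlnumIdx cs i with
  | case1 i h ha ih =>
    rw [ih]
    rw [List.drop_eq_getElem_cons h, List.takeWhile_cons, ha]
    simp; omega
  | case2 i h ha =>
    rw [List.drop_eq_getElem_cons h]
    simp [ha]
  | case3 i h =>
    rw [List.drop_eq_nil_of_le (by omega)]
    simp

lemma take_takeWhile_len (p : Char → Bool) (l : List Char) :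
    List.take (l.takeWhile p).length l = l.takeWhile p := by
  induction l with
  | nil => rfl
  | cons c t ih => by_cases h : p c <;> simp [h, ih]

lemma isalnum_lowerChar (c : Char) :
    PySem.Chars.isalnum (PySem.Chars.lowerChar c) = PySem.Chars.isalnum c := by
  unfold PySem.Chars.lowerChar
  by_cases h : PySem.Chars.isupper c = true
  · simp only [h, if_pos]
    unfold PySem.Chars.isupper at h
    have hle : ∀ a b : Char, (a ≤ b) ↔ (a.toNat ≤ b.toNat) := fun a b => ge_iff_le
    simp only [Bool.and_eq_true, decide_eq_true_eq, hle] at h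
    have hA : 'A'.toNat = 65 := rfl
    have hZ : 'Z'.toNat = 90 := rfl
    rw [hA, hZ] at h
    have hv : (c.toNat + 32).isValidChar := by left; omega
    have htn : (Char.ofNat (c.toNat + 32)).toNat = c.toNat + 32 := by
      simp only [Char.ofNat, hv, reduceDIte]
      rfl
    unfold PySem.Chars.isalnum PySem.Chars.isalpha PySem.Chars.isupper PySem.Chars.islower PySem.Chars.isdigit
    have ha : 'a'.toNat = 97 := rfl
    have hz : 'z'.toNat = 122 := rfl
    have h0 : '0'.toNat = 48 := rfl
    have h9 : '9'.toNat = 57 := rfl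
    rw [Bool.eq_iff_iff]
    simp only [Bool.or_eq_true, Bool.and_eq_true, decide_eq_true_eq, hle, htn, ha, hz, h0, h9, hA, hZ]
    constructor <;> intro <;> omega
  · simp [h]

lemma lower_takeWhile (cs : List Char) :
    PySem.Chars.lower (cs.takeWhile PySem.Chars.isalnum)
      = (PySem.Chars.lower cs).takeWhile PySem.Chars.isalnum := by
  have h : (PySem.Chars.isalnum ∘ PySem.Chars.lowerChar) = PySem.Chars.isalnum :=
    funext fun c => isalnum_lowerChar c
  simp only [PySem.Chars.lower, List.takeWhile_map, h]

lemma alnum_prefix_eq (cs : List Char) :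
    alnum_prefix (String.ofList cs) = String.ofList ((PySem.Chars.lower cs).takeWhile PySem.Chars.isalnum) := by
  unfold alnum_prefix
  rw [String.toList_ofList, pvAlnumIdx_eq]
  simp only [List.drop_zero, Nat.zero_add]
  rw [take_takeWhile_len, lower_takeWhile]

-- A's per-word step is driven by pvTagOf?
lemma stepA_eq (w : List Char) (res : List String) :
    (if w.head? == some '#' && decide (1 < w.length) then
      (let hashtag := alnum_prefix (String.ofList (w.drop 1));
       if hashtag ≠ "" ∧ hashtag ∉ res then res ++ [hashtag] else res)
     else res)
    = match pvTagOf? w with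
      | some s => if s ∈ res then res else res ++ [s]
      | none => res := by
  unfold pvTagOf?
  by_cases hh : w.head? = some '#'
  · by_cases hl : 1 < w.length
    · simp only [hh, hl, beq_self_eq_true, Bool.true_and, decide_true, if_pos, if_true]
      rw [alnum_prefix_eq]
      set h := (PySem.Chars.lower (w.drop 1)).takeWhile PySem.Chars.isalnum with hdef
      by_cases he : h = []
      · rw [if_pos he, he]
        simp
      · rw [if_neg he]
        have hne : String.ofList h ≠ "" := by simpa using he
        simp only [ne_eq, hne, not_false_iff, true_and]
        by_cases hm : String.ofList h ∈ res <;> simp [hm]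
    · obtain ⟨c, t, rfl⟩ : ∃ c t, w = c :: t := by
        cases w with
        | nil => simp at hh
        | cons c t => exact ⟨c, t, rfl⟩
      obtain rfl : t = [] := by
        simp only [List.length_cons] at hl
        exact List.eq_nil_of_length_eq_zero (by omega)
      simp at hh
      simp [hh, PySem.Chars.lower]
  · simp only [hh, if_neg, beq_iff_eq]
    simp [hh]

-- generic: A's dedup-append fold is a Set.update over the raw stream
lemma foldA_eq (ws : List (List Char)) (acc : List String) :
    ws.foldl (fun result word =>
      if word.head? == some '#' && decide (1 < word.length) then
        (let hashtag := alnum_prefix (String.ofList (word.drop 1));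
         if hashtag ≠ "" ∧ hashtag ∉ result then result ++ [hashtag] else result)
      else result) acc
    = PySem.Set.update acc (ws.filterMap pvTagOf?) := by
  induction ws generalizing acc with
  | nil => simp [PySem.Set.update_nil]
  | cons w r ih =>
    rw [List.foldl_cons, stepA_eq, List.filterMap_cons]
    cases htag : pvTagOf? w with
    | none => exact ih acc
    | some s =>
      rw [PySem.Set.update_cons, ← ih]
      congr 1
      rw [PySem.Set.add_eq_ite]

lemma extract_eq (t : String) : extract_hashtags t = PySem.Set.ofList (pvRaw t.toList) := by
  unfold extract_hashtags pvRaw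
  rw [foldA_eq, PySem.Set.update_nil_left]

lemma update_ofList (s : PySem.Set String) (l : List String) :
    PySem.Set.update s (PySem.Set.ofList l) = PySem.Set.update s l := by
  rw [PySem.Set.update_eq_append_filter s (PySem.Set.ofList l), PySem.Set.ofList_ofList,
    ← PySem.Set.update_eq_append_filter]

-- ===== split₀ structure (shared vocabulary of the two ports) =====

lemma go_nil_eq (cur : List Char) (acc : List (List Char)) :
    PySem.Chars.split₀.go [] cur acc
      = if cur.isEmpty then acc.reverse else (cur.reverse :: acc).reverse := rfl

lemma go_cons_eq (c : Char) (rest cur : List Char) (acc : List (List Char)) :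
    PySem.Chars.split₀.go (c :: rest) cur acc =
      if PySem.Chars.isspace c then
        (if cur.isEmpty then PySem.Chars.split₀.go rest [] acc
         else PySem.Chars.split₀.go rest [] (cur.reverse :: acc))
      else PySem.Chars.split₀.go rest (c :: cur) acc := rfl

lemma go_acc (s cur : List Char) (acc : List (List Char)) :
    PySem.Chars.split₀.go s cur acc = acc.reverse ++ PySem.Chars.split₀.go s cur [] := by
  induction s generalizing cur acc with
  | nil =>
    rw [go_nil_eq, go_nil_eq]
    by_cases hc : cur.isEmpty <;> simp [hc]
  | cons c rest ih =>
    rw [go_cons_eq, go_cons_eq]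
    by_cases hs : PySem.Chars.isspace c
    · by_cases hc : cur.isEmpty
      · simp only [hs, hc, if_pos, if_true]
        exact ih [] acc
      · simp only [hs, hc, if_pos, if_true, if_neg, Bool.false_eq_true, not_false_iff, if_false]
        rw [ih [] (cur.reverse :: acc), ih [] [cur.reverse]]
        simp
    · simp only [hs, Bool.false_eq_true, if_false]
      exact ih (c :: cur) acc

-- go consumes a whole word in one stride
lemma go_word (r : List Char) (cur : List Char) (acc : List (List Char)) :
    PySem.Chars.split₀.go r cur acc
      = PySem.Chars.split₀.go (r.dropWhile (fun x => !PySem.Chars.isspace x))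
          ((r.takeWhile (fun x => !PySem.Chars.isspace x)).reverse ++ cur) acc := by
  induction r generalizing cur acc with
  | nil => simp
  | cons d r2 ih =>
    by_cases hd : PySem.Chars.isspace d
    · simp [hd, List.takeWhile_cons, List.dropWhile_cons]
    · rw [go_cons_eq]
      simp only [hd, Bool.false_eq_true, if_false]
      rw [ih (d :: cur) acc]
      simp [List.takeWhile_cons, List.dropWhile_cons, hd]

lemma split₀_cons_space {c : Char} (hs : PySem.Chars.isspace c = true) (r : List Char) :
    PySem.Chars.split₀ (c :: r) = PySem.Chars.split₀ r := by
  unfold PySem.Chars.split₀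
  rw [go_cons_eq]
  simp [hs]

lemma pv_dropWhile_head_false {p : Char → Bool} {l : List Char} {d : Char} {r : List Char}
    (h : l.dropWhile p = d :: r) : p d = false := by
  induction l with
  | nil => simp at h
  | cons x t ih =>
    by_cases hx : p x
    · rw [List.dropWhile_cons_of_pos hx] at h
      exact ih h
    · rw [List.dropWhile_cons_of_neg hx] at h
      cases h
      simpa using hx

lemma split₀_cons_nonspace {c : Char} (hs : PySem.Chars.isspace c = false) (r : List Char) :
    PySem.Chars.split₀ (c :: r)
      = (c :: r.takeWhile (fun x => !PySem.Chars.isspace x))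
          :: PySem.Chars.split₀ (r.dropWhile (fun x => !PySem.Chars.isspace x)) := by
  unfold PySem.Chars.split₀
  rw [go_cons_eq]
  simp only [hs, Bool.false_eq_true, if_false]
  rw [go_word r [c] []]
  set u := r.takeWhile (fun x => !PySem.Chars.isspace x)
  set rest := r.dropWhile (fun x => !PySem.Chars.isspace x) with hrest
  cases hr : rest with
  | nil =>
    rw [go_nil_eq, go_nil_eq]
    simp
  | cons d r2 =>
    have hd : PySem.Chars.isspace d = true := by
      have := pv_dropWhile_head_false (hrest ▸ hr)
      simpa using this
    rw [go_cons_eq]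
    have hne : ((u.reverse ++ [c]).isEmpty) = false := by simp
    simp only [hd, hne, Bool.false_eq_true, if_true, if_false]
    rw [go_acc r2 [] [(u.reverse ++ [c]).reverse]]
    rw [go_cons_eq]
    simp [hd]

-- alphanumeric characters are not whitespace
lemma alnum_nonspace {c : Char} (h : PySem.Chars.isalnum c = true) :
    PySem.Chars.isspace c = false := by
  unfold PySem.Chars.isalnum PySem.Chars.isalpha PySem.Chars.isupper PySem.Chars.islower PySem.Chars.isdigit at h
  unfold PySem.Chars.isspace
  have hle : ∀ a b : Char, (a ≤ b) ↔ (a.toNat ≤ b.toNat) := fun a b => ge_iff_le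
  simp only [Bool.or_eq_true, Bool.and_eq_true, decide_eq_true_eq, hle] at h
  have ha : 'a'.toNat = 97 := rfl
  have hz : 'z'.toNat = 122 := rfl
  have hA : 'A'.toNat = 65 := rfl
  have hZ : 'Z'.toNat = 90 := rfl
  have h0 : '0'.toNat = 48 := rfl
  have h9 : '9'.toNat = 57 := rfl
  rw [ha, hz, hA, hZ, h0, h9] at h
  simp only [Bool.or_eq_false_iff, Bool.and_eq_false_iff, decide_eq_false_iff_not]
  omega

lemma tw_tw {p q : Char → Bool} (h : ∀ a, q a = true → p a = true) (l : List Char) :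
    (l.takeWhile p).takeWhile q = l.takeWhile q := by
  induction l with
  | nil => rfl
  | cons x t ih =>
    by_cases hq : q x
    · have hp : p x := h x hq
      simp [List.takeWhile_cons, hp, hq, ih]
    · by_cases hp : p x <;> simp [List.takeWhile_cons, hp, hq]

lemma dw_dw {p q : Char → Bool} (h : ∀ a, q a = true → p a = true) (l : List Char) :
    l.dropWhile p = (l.dropWhile q).dropWhile p := by
  induction l with
  | nil => rfl
  | cons x t ih =>
    by_cases hq : q x
    · have hp : p x := h x hq
      simp [List.dropWhile_cons, hp, hq, ih]
    · simp [List.dropWhile_cons, hq]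

-- ===== FSM characterisation =====

-- skipping a word reaches the next whitespace gap
lemma scan_skip (cs : List Char) (tags : List String) :
    pvScanGo cs PvMode.skip tags
      = pvScanGo (cs.dropWhile (fun x => !PySem.Chars.isspace x)) PvMode.between tags := by
  induction cs with
  | nil => rfl
  | cons c r ih =>
    by_cases hs : PySem.Chars.isspace c
    · simp [pvScanGo, hs, List.dropWhile_cons]
    · simp [pvScanGo, hs, List.dropWhile_cons, ih]

-- collecting consumes the alphanumeric run, emits it, then skips or rests
lemma scan_collect (cs : List Char) (buf : List Char) (tags : List String) :
    pvScanGo cs (PvMode.collect buf) tags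
      = match cs.dropWhile PySem.Chars.isalnum with
        | [] => pvEmit (buf ++ PySem.Chars.lower (cs.takeWhile PySem.Chars.isalnum)) tags
        | d :: r =>
          pvScanGo r (if PySem.Chars.isspace d then PvMode.between else PvMode.skip)
            (pvEmit (buf ++ PySem.Chars.lower (cs.takeWhile PySem.Chars.isalnum)) tags) := by
  induction cs generalizing buf with
  | nil => simp [pvScanGo, PySem.Chars.lower]
  | cons c r ih =>
    by_cases ha : PySem.Chars.isalnum c
    · rw [show pvScanGo (c :: r) (PvMode.collect buf) tags
          = pvScanGo r (PvMode.collect (buf ++ [PySem.Chars.lowerChar c])) tags by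
        simp [pvScanGo, ha]]
      rw [ih]
      simp [List.takeWhile_cons, List.dropWhile_cons, ha, PySem.Chars.lower]
    · rw [show pvScanGo (c :: r) (PvMode.collect buf) tags
          = pvScanGo r (if PySem.Chars.isspace c then PvMode.between else PvMode.skip)
              (pvEmit buf tags) by simp [pvScanGo, ha]]
      simp [List.takeWhile_cons, List.dropWhile_cons, ha, PySem.Chars.lower]

-- pvEmit of a lowered alnum run is exactly the Set.add driven by pvTagOf?
lemma emit_eq_add (t : List Char) (tags : List String) :
    pvEmit t tags
      = (if t = [] then tags else PySem.Set.add tags (String.ofList t)) := by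
  unfold pvEmit
  by_cases ht : t = []
  · simp [ht]
  · have hne : String.ofList t ≠ "" := by simpa using ht
    rw [if_neg ht, PySem.Set.add_eq_ite]
    simp only [ne_eq, hne, not_false_iff, true_and]
    by_cases hm : String.ofList t ∈ tags <;> simp [hm]

-- the main FSM invariant: from the between state, the scan performs exactly a
-- Set.update with the raw tag stream of the rest of the text
lemma scan_between_aux (n : Nat) :
    ∀ (cs : List Char), cs.length ≤ n → ∀ (tags : List String),
      pvScanGo cs PvMode.between tags = PySem.Set.update tags (pvRaw cs) := by
  induction n with
  | zero =>
    intro cs hl tags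
    have : cs = [] := List.eq_nil_of_length_eq_zero (by omega)
    subst this
    simp [pvScanGo, pvRaw, PySem.Chars.split₀, go_nil_eq, PySem.Set.update_nil]
  | succ n ih =>
    intro cs hl tags
    cases cs with
    | nil => simp [pvScanGo, pvRaw, PySem.Chars.split₀, go_nil_eq, PySem.Set.update_nil]
    | cons c r =>
      have hrlen : r.length ≤ n := by simpa using hl
      by_cases hs : PySem.Chars.isspace c
      · rw [show pvScanGo (c :: r) PvMode.between tags = pvScanGo r PvMode.between tags by
          simp [pvScanGo, hs]]
        rw [ih r hrlen tags]
        unfold pvRaw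
        rw [split₀_cons_space hs]
      · have hs' : PySem.Chars.isspace c = false := by simpa using hs
        have hraw : pvRaw (c :: r)
            = (match pvTagOf? (c :: r.takeWhile (fun x => !PySem.Chars.isspace x)) with
               | none => []
               | some s => [s]) ++ pvRaw (r.dropWhile (fun x => !PySem.Chars.isspace x)) := by
          unfold pvRaw
          rw [split₀_cons_nonspace hs', List.filterMap_cons]
          cases pvTagOf? (c :: r.takeWhile (fun x => !PySem.Chars.isspace x)) <;> simp
        by_cases hc : c = '#'
        · subst hc
          rw [show pvScanGo ('#' :: r) PvMode.between tags
              = pvScanGo r (PvMode.collect []) tags by simp [pvScanGo, hs]]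
          rw [scan_collect]
          -- identify the tag of the first word
          have htag : pvTagOf? ('#' :: r.takeWhile (fun x => !PySem.Chars.isspace x))
              = (if r.takeWhile PySem.Chars.isalnum = [] then none
                 else some (String.ofList (PySem.Chars.lower (r.takeWhile PySem.Chars.isalnum)))) := by
            unfold pvTagOf?
            have h1 : (r.takeWhile (fun x => !PySem.Chars.isspace x)).takeWhile PySem.Chars.isalnum
                = r.takeWhile PySem.Chars.isalnum :=
              tw_tw (fun a ha => by simp [alnum_nonspace ha]) r
            simp only [List.head?_cons, List.drop_succ_cons, List.drop_zero, if_pos]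
            rw [← lower_takeWhile, h1]
            by_cases he : r.takeWhile PySem.Chars.isalnum = []
            · simp [he, PySem.Chars.lower]
            · have : PySem.Chars.lower (r.takeWhile PySem.Chars.isalnum) ≠ [] := by
                simpa [PySem.Chars.lower] using he
              simp [he, this]
          have hdw : r.dropWhile (fun x => !PySem.Chars.isspace x)
              = (r.dropWhile PySem.Chars.isalnum).dropWhile (fun x => !PySem.Chars.isspace x) :=
            dw_dw (fun a ha => by simp [alnum_nonspace ha]) r
          have hemit : pvEmit ([] ++ PySem.Chars.lower (r.takeWhile PySem.Chars.isalnum)) tags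
              = (match pvTagOf? ('#' :: r.takeWhile (fun x => !PySem.Chars.isspace x)) with
                 | none => tags
                 | some s => PySem.Set.add tags s) := by
            rw [htag, List.nil_append, emit_eq_add]
            by_cases he : r.takeWhile PySem.Chars.isalnum = []
            · simp [he, PySem.Chars.lower]
            · have hlne : PySem.Chars.lower (r.takeWhile PySem.Chars.isalnum) ≠ [] := by
                simpa [PySem.Chars.lower] using he
              simp [he, hlne]
          cases hdrop : r.dropWhile PySem.Chars.isalnum with
          | nil =>
            dsimp only
            -- the whole rest is one alphanumeric word
            have hu : r.dropWhile (fun x => !PySem.Chars.isspace x) = [] := by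
              rw [hdw, hdrop]; rfl
            rw [hraw, hu, hemit]
            cases pvTagOf? ('#' :: r.takeWhile (fun x => !PySem.Chars.isspace x)) with
            | none => simp [pvRaw, PySem.Chars.split₀, go_nil_eq, PySem.Set.update_nil]
            | some s =>
              simp [pvRaw, PySem.Chars.split₀, go_nil_eq, PySem.Set.update_cons,
                PySem.Set.update_nil]
          | cons d r2 =>
            have hr2len : r2.length ≤ n := by
              have := List.length_dropWhile_le (p := PySem.Chars.isalnum) (l := r)
              rw [hdrop] at this
              simp at this
              omega
            have hu : r.dropWhile (fun x => !PySem.Chars.isspace x)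
                = (d :: r2).dropWhile (fun x => !PySem.Chars.isspace x) := by
              rw [hdw, hdrop]
            dsimp only
            by_cases hd : PySem.Chars.isspace d
            · rw [if_pos hd, ih r2 hr2len, hraw, hemit, hu]
              rw [show (d :: r2).dropWhile (fun x => !PySem.Chars.isspace x) = d :: r2 by
                simp [List.dropWhile_cons, hd]]
              cases pvTagOf? ('#' :: r.takeWhile (fun x => !PySem.Chars.isspace x)) with
              | none =>
                unfold pvRaw
                rw [split₀_cons_space hd]
                simp
              | some s =>
                unfold pvRaw
                rw [split₀_cons_space hd]
                simp [PySem.Set.update_cons]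
            · rw [if_neg hd, scan_skip]
              have hlen2 : ((d :: r2).dropWhile (fun x => !PySem.Chars.isspace x)).length ≤ n := by
                have h1 : (d :: r2).dropWhile (fun x => !PySem.Chars.isspace x)
                    = r2.dropWhile (fun x => !PySem.Chars.isspace x) := by
                  simp [List.dropWhile_cons, hd]
                rw [h1]
                have := List.length_dropWhile_le (p := fun x => !PySem.Chars.isspace x) (l := r2)
                omega
              have h1 : r2.dropWhile (fun x => !PySem.Chars.isspace x)
                  = (d :: r2).dropWhile (fun x => !PySem.Chars.isspace x) := by
                simp [List.dropWhile_cons, hd]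
              rw [h1, ih _ hlen2, hraw, hemit, hu]
              cases pvTagOf? ('#' :: r.takeWhile (fun x => !PySem.Chars.isspace x)) with
              | none => simp
              | some s => simp [PySem.Set.update_cons]
        · -- a word that does not start with '#': its tag is none
          rw [show pvScanGo (c :: r) PvMode.between tags = pvScanGo r PvMode.skip tags by
            simp [pvScanGo, hs, hc]]
          rw [scan_skip]
          have hlen2 : (r.dropWhile (fun x => !PySem.Chars.isspace x)).length ≤ n := by
            have := List.length_dropWhile_le (p := fun x => !PySem.Chars.isspace x) (l := r)
            omega
          rw [ih _ hlen2, hraw]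
          have : pvTagOf? (c :: r.takeWhile (fun x => !PySem.Chars.isspace x)) = none := by
            unfold pvTagOf?
            simp [hc]
          rw [this]
          simp

lemma scan_between (cs : List Char) (tags : List String) :
    pvScanGo cs PvMode.between tags = PySem.Set.update tags (pvRaw cs) :=
  scan_between_aux cs.length cs le_rfl tags

-- ===== dict lemmas: A's inner machinery only touches key u =====

lemma dict_tag_fold (u : String) (l : List String) (f : PySem.Dict String (List String)) (acc : List String) :
    l.foldl (fun f tag =>
        if tag ∈ f.getD u ([] : List String) then f
        else f.insert u (f.getD u [] ++ [tag])) (f.insert u acc)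
    = f.insert u (PySem.Set.update acc l) := by
  induction l generalizing acc with
  | nil => rw [List.foldl_nil, PySem.Set.update_nil]
  | cons t r ih =>
    rw [List.foldl_cons, PySem.Set.update_cons]
    rw [PySem.Dict.getD_insert_self]
    by_cases hm : t ∈ acc
    · rw [if_pos hm, ih, PySem.Set.add_of_mem hm]
    · rw [if_neg hm, PySem.Dict.insert_insert_self, ih, PySem.Set.add_of_not_mem hm]

lemma dict_tweet_fold (u : String) (ts : List (String × Int × String × Int × Int))
    (f : PySem.Dict String (List String)) (acc : List String) :
    ts.foldl (fun f tweet =>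
        (extract_hashtags tweet.1).foldl (fun f tag =>
            if tag ∈ f.getD u ([] : List String) then f
            else f.insert u (f.getD u [] ++ [tag])) f)
      (f.insert u acc)
    = f.insert u (ts.foldl (fun a tw => PySem.Set.update a (extract_hashtags tw.1)) acc) := by
  induction ts generalizing acc with
  | nil => rfl
  | cons tw r ih =>
    rw [List.foldl_cons, dict_tag_fold, ih, List.foldl_cons]

-- per-user value: A's dedup-merge of per-tweet extractions is B's shared FSM fold
lemma user_value (ts : List (String × Int × String × Int × Int)) (acc : List String) :
    ts.foldl (fun a tw => PySem.Set.update a (extract_hashtags tw.1)) acc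
      = ts.foldl (fun tags tw => pvScanGo tw.1.toList PvMode.between tags) acc := by
  apply List.foldl_ext
  intro a tw _
  rw [extract_eq, update_ofList, scan_between]

-- ===== VERDICT (by name: the statement is the Claim_ definition above) =====
theorem user_tags_spec : Claim_equal_user_tags := by
  intro d _
  unfold Spec_user_tags user_tags user_tags_alt
  congr 1
  apply List.foldl_ext
  intro f p _
  rw [dict_tweet_fold, user_value]
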